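-- pv_equiv track=rewrite | github.com/huangd1999/CBS | calculate_biask.py | generate_test_template
-- ===== SOURCE A (Python) =====
-- import itertools
--
-- def generate_test_template(function_name, parameters,function_attributes):
--     test_case_list = []
--     for param in parameters:
--         if param not in function_attributes.keys():
--             function_attributes[param] = [""]
--
--
--     for change_idx, change_param in enumerate(parameters):
--
--         change_param_values = function_attributes[change_param]
--         change_idx_test_case = []
--
--         # for left_value in change_param_values:
--         #     for right_value in change_param_values:
--         for left_idx in range(len(change_param_values)):
--             for right_idx in range(left_idx,len(change_param_values)):
--                 left_value = change_param_values[left_idx]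
--                 right_value = change_param_values[right_idx]
--                 if left_value != right_value:
--
--                     constant_params = parameters[:change_idx] + parameters[change_idx+1:]
--                     constant_combinations = itertools.product(*(function_attributes[param] for param in constant_params))
--
--
--                     for constant_combination in constant_combinations:
--                         left_function = f'{function_name}('
--                         right_function = f'{function_name}('
--                         test_case_template = f'assert {function_name}('
--
--
--                         for i, param in enumerate(parameters):
--                             if i == change_idx:
--
--                                 left_param_value = f'"{left_value}"' if isinstance(left_value, str) else str(left_value)
--                                 right_param_value = f'"{right_value}"' if isinstance(right_value, str) else str(right_value)
--                             else:
--
--                                 param_value = constant_combination[i - (i > change_idx)]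
--                                 param_value = f'"{param_value}"' if isinstance(param_value, str) else str(param_value)
--                                 left_param_value = right_param_value = param_value
--
--
--                             left_function += left_param_value + ', '
--                             right_function += right_param_value + ', '
--                             test_case_template += left_param_value + ', '
--
--
--                         left_function = left_function[:-2] + ')'
--                         right_function = right_function[:-2] + ')'
--                         test_case_template = test_case_template[:-2] + f') == {function_name}('
--
--                         test_case_template += ', '.join(right_function.split('(')[1].split(')')[0].split(', ')) + ')\n'
--
--
--                         # test_case_list.append([left_function, right_function, test_case_template])
--                         change_idx_test_case.append([left_function, right_function, test_case_template])
--         test_case_list.append(change_idx_test_case)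
--
--     return test_case_list
-- ===== SOURCE B (Python) =====
-- import itertools
--
-- def generate_test_template(function_name, parameters, function_attributes):
--     # same pre-pass (mutates function_attributes like the original)
--     for param in parameters:
--         if param not in function_attributes.keys():
--             function_attributes[param] = [""]
--
--     def quote(v):
--         return f'"{v}"' if isinstance(v, str) else str(v)
--
--     test_case_list = []
--     for change_idx in range(len(parameters)):
--         values = function_attributes[parameters[change_idx]]
--         sub = []
--         if len(set(values)) > 1:
--             # ONE global cross product over ALL parameters, with the changing slot
--             # tagged by its value index so the product can be bucketed per value
--             cells = [
--                 [(i, v) for i, v in enumerate(values)] if j == change_idx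
--                 else [(None, v) for v in function_attributes[p]]
--                 for j, p in enumerate(parameters)
--             ]
--             full = list(itertools.product(*cells))
--             buckets = [
--                 [[quote(v) for _, v in combo] for combo in full if combo[change_idx][0] == i]
--                 for i in range(len(values))
--             ]
--             for i in range(len(values)):
--                 for j in range(i + 1, len(values)):
--                     if values[i] != values[j]:
--                         # rows at equal offsets share their constant part
--                         for lrow, rrow in zip(buckets[i], buckets[j]):
--                             largs = ', '.join(lrow)
--                             right_function = f'{function_name}({", ".join(rrow)})'
--                             inner = right_function.split('(')[1].split(')')[0]
--                             sub.append([
--                                 f'{function_name}({largs})',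
--                                 right_function,
--                                 f'assert {function_name}({largs}) == {function_name}({inner})\n',
--                             ])
--         test_case_list.append(sub)
--     return test_case_list
-- ===== Notes on version B (the rewrite author's own statement) =====
-- stated objective: alternative
-- what changed: Instead of re-running itertools.product over the constant parameters inside the value-pair loops and splicing each pair into every combination while growing strings chopped with [:-2], B computes ONE global cross product over all parameters per change_idx (only when the parameter has more than one distinct value) with the changing slot tagged by its value index, buckets its already-quoted rows by that tag, and for each unequal value pair zips the two buckets - rows at equal offsets share their constant part - joining complete rows into the output strings.
import Mathlib
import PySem

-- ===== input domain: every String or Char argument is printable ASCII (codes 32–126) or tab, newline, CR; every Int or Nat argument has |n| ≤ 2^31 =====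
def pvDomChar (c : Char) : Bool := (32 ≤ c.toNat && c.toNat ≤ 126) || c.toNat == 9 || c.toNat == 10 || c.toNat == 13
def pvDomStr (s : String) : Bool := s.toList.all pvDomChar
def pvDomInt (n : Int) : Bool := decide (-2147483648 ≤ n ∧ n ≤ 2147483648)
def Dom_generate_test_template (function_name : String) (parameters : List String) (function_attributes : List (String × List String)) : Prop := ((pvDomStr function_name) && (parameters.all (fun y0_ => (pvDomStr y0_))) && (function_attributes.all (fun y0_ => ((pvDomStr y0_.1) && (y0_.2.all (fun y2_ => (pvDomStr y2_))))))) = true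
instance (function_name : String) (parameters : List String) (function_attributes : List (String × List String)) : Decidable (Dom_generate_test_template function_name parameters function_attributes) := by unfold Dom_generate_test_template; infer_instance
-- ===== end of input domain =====

-- B replaces A's per-pair re-enumeration of itertools.product over the constant
-- parameters (with the left/right value spliced into each combination while three
-- strings are grown and chopped with [:-2]) by ONE global cross product over ALL
-- parameters per change_idx — built only when the parameter has more than one
-- distinct value — whose rows, tagged at the changing slot by the value index, are
-- bucketed per value; each unequal value pair then just zips its two buckets (rows
-- at equal offsets share their constant part) and joins complete rows. Like A, B
-- mutates function_attributes (adds [""] for missing parameters); the theorem is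
-- about the return value.

-- ===== PORT A =====
-- f'"{v}"' — the isinstance(left_value, str) test is always true here (values are str)
def pvQuoteA (v : String) : String := "\"" ++ v ++ "\""

-- itertools.product over a list of value lists, leftmost varying slowest (used by both ports)
def pvProd {α : Type} : List (List α) → List (List α)
  | [] => [[]]
  | l :: ls => l.flatMap (fun x => (pvProd ls).map (fun t => x :: t))

-- the pre-pass: for param in parameters: if param not in keys: function_attributes[param] = [""]
def pvFillA (parameters : List String) (d : PySem.Dict String (List String)) : PySem.Dict String (List String) :=
  parameters.foldl (fun d param => if d.contains param then d else d.insert param [""]) d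

-- body of the 'for i, param in enumerate(parameters)' loop, state (left_function, right_function, test_case_template)
def pvStepA (change_idx : Int) (left_value right_value : String) (constant_combination : List String)
    (s : String × String × String) (ip : Int × String) : String × String × String :=
  let i := ip.1
  let (left_param_value, right_param_value) :=
    if i == change_idx then (pvQuoteA left_value, pvQuoteA right_value)
    else
      let param_value := pvQuoteA (PySem.List.pyGetD constant_combination (i - (if change_idx < i then 1 else 0)) "")
      (param_value, param_value)
  (s.1 ++ left_param_value ++ ", ", s.2.1 ++ right_param_value ++ ", ", s.2.2 ++ left_param_value ++ ", ")

-- one appended [left_function, right_function, test_case_template]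
def pvItemA (function_name : String) (parameters : List String) (change_idx : Int)
    (left_value right_value : String) (constant_combination : List String) : List String :=
  let st := (PySem.List.enumerate parameters).foldl
    (pvStepA change_idx left_value right_value constant_combination)
    (function_name ++ "(", function_name ++ "(", "assert " ++ function_name ++ "(")
  let left_function := PySem.Str.slice st.1 none (some (-2)) ++ ")"
  let right_function := PySem.Str.slice st.2.1 none (some (-2)) ++ ")"
  let test_case_template := PySem.Str.slice st.2.2 none (some (-2)) ++ ") == " ++ function_name ++ "("
  let test_case_template := test_case_template ++
    PySem.Str.join ", " ((PySem.Str.split?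
      (PySem.List.pyGetD ((PySem.Str.split?
        (PySem.List.pyGetD ((PySem.Str.split? right_function "(").getD []) 1 "") ")").getD []) 0 "")
      ", ").getD []) ++ ")\n"
  [left_function, right_function, test_case_template]

def generate_test_template (function_name : String) (parameters : List String) (function_attributes : List (String × List String)) : List (List (List String)) :=
  let fa := pvFillA parameters (PySem.Dict.mk function_attributes)
  (PySem.List.enumerate parameters).foldl
    (fun test_case_list icp =>
      let change_idx := icp.1
      let change_param := icp.2
      let change_param_values := (fa.get? change_param).getD []
      let n : Int := change_param_values.length
      let change_idx_test_case := (PySem.List.pyRange 0 n 1).foldl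
        (fun acc left_idx =>
          (PySem.List.pyRange left_idx n 1).foldl
            (fun acc2 right_idx =>
              let left_value := PySem.List.pyGetD change_param_values left_idx ""
              let right_value := PySem.List.pyGetD change_param_values right_idx ""
              if left_value != right_value then
                let constant_params := PySem.List.slice parameters none (some change_idx) ++
                  PySem.List.slice parameters (some (change_idx + 1)) none
                let constant_combinations := pvProd (constant_params.map (fun param => (fa.get? param).getD []))
                constant_combinations.foldl
                  (fun a c => a ++ [pvItemA function_name parameters change_idx left_value right_value c]) acc2
              else acc2)
            acc)
        []
      test_case_list ++ [change_idx_test_case])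
    []

-- ===== PORT B =====
def pvQuoteB (v : String) : String := "\"" ++ v ++ "\""

def pvFillB (parameters : List String) (d : PySem.Dict String (List String)) : PySem.Dict String (List String) :=
  parameters.foldl (fun d param => if d.contains param then d else d.insert param [""]) d

-- the cell list: [(i, v) for i, v in enumerate(values)] at the changing slot, [(None, v) …] elsewhere
def pvCellsB (change_idx : Int) (values : List String) (fa : PySem.Dict String (List String))
    (parameters : List String) : List (List (Option Int × String)) :=
  (PySem.List.enumerate parameters).map (fun jp =>
    if jp.1 == change_idx then (PySem.List.enumerate values).map (fun iv => (some iv.1, iv.2))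
    else ((fa.get? jp.2).getD []).map (fun v => ((none : Option Int), v)))

-- [quote(v) for _, v in combo]
def pvRowB (combo : List (Option Int × String)) : List String := combo.map (fun tv => pvQuoteB tv.2)

-- one appended [left_function, right_function, template] from two complete rows
def pvItemB (function_name : String) (lrow rrow : List String) : List String :=
  let largs := PySem.Str.join ", " lrow
  let right_function := function_name ++ "(" ++ PySem.Str.join ", " rrow ++ ")"
  let inner := PySem.List.pyGetD ((PySem.Str.split?
    (PySem.List.pyGetD ((PySem.Str.split? right_function "(").getD []) 1 "") ")").getD []) 0 ""
  [function_name ++ "(" ++ largs ++ ")", right_function,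
   "assert " ++ function_name ++ "(" ++ largs ++ ") == " ++ function_name ++ "(" ++ inner ++ ")\n"]

def generate_test_template_alt (function_name : String) (parameters : List String) (function_attributes : List (String × List String)) : List (List (List String)) :=
  let fa := pvFillB parameters (PySem.Dict.mk function_attributes)
  (PySem.List.pyRange 0 parameters.length 1).foldl
    (fun test_case_list change_idx =>
      let values := (fa.get? (PySem.List.pyGetD parameters change_idx "")).getD []
      let sub :=
        if 1 < (PySem.Set.ofList values).length then
          let full := pvProd (pvCellsB change_idx values fa parameters)
          let buckets := (PySem.List.pyRange 0 values.length 1).map (fun i =>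
            (full.filter (fun combo =>
              (PySem.List.pyGetD combo change_idx ((none : Option Int), "")).1 == some i)).map pvRowB)
          let n : Int := values.length
          (PySem.List.pyRange 0 n 1).foldl
            (fun acc i =>
              (PySem.List.pyRange (i + 1) n 1).foldl
                (fun acc2 j =>
                  if PySem.List.pyGetD values i "" != PySem.List.pyGetD values j "" then
                    ((PySem.List.pyGetD buckets i []).zip (PySem.List.pyGetD buckets j [])).foldl
                      (fun a lr => a ++ [pvItemB function_name lr.1 lr.2]) acc2
                  else acc2)
                acc)
            []
        else []
      test_case_list ++ [sub])
    []

-- ===== PRECONDITION & SPEC =====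
def Spec_generate_test_template (function_name : String) (parameters : List String) (function_attributes : List (String × List String)) (out : List (List (List String))) : Prop := out = generate_test_template_alt function_name parameters function_attributes
instance (function_name : String) (parameters : List String) (function_attributes : List (String × List String)) (out : List (List (List String))) : Decidable (Spec_generate_test_template function_name parameters function_attributes out) := by unfold Spec_generate_test_template; infer_instance

-- ===== CLAIM (what is proved, stated in full; the proofs are below) =====
def Claim_equal_generate_test_template : Prop := ∀ (function_name : String) (parameters : List String) (function_attributes : List (String × List String)), Dom_generate_test_template function_name parameters function_attributes → Spec_generate_test_template function_name parameters function_attributes (generate_test_template function_name parameters function_attributes)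

-- ===== LEMMAS AND PROOFS =====

-- proof-side helpers
def pvTagN (v : String) : Option Int × String := ((none : Option Int), v)

-- row[:k] + [q] + row[k:]
def pvSplice (k : Nat) (row : List String) (q : String) : List String :=
  row.take k ++ [q] ++ row.drop k

theorem pvLit_comma : (", " : String).toList = [',', ' '] := rfl
theorem pvLit_lpar : ("(" : String).toList = ['('] := rfl
theorem pvLit_rpar : (")" : String).toList = [')'] := rfl
theorem pvLit_assert : ("assert " : String).toList = ['a', 's', 's', 'e', 'r', 't', ' '] := rfl
theorem pvLit_eqmid : (") == " : String).toList = [')', ' ', '=', '=', ' '] := rfl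

theorem pvProd_length {α : Type} {ls : List (List α)} {c : List α}
    (hc : c ∈ pvProd ls) : c.length = ls.length := by
  induction ls generalizing c with
  | nil => simp [pvProd] at hc; simp [hc]
  | cons l ls ih =>
    simp [pvProd] at hc
    obtain ⟨x, -, t, ht, rfl⟩ := hc
    simp [ih ht]

theorem pvProd_append {α : Type} (xs ys : List (List α)) :
    pvProd (xs ++ ys) = (pvProd xs).flatMap (fun a => (pvProd ys).map (fun b => a ++ b)) := by
  induction xs with
  | nil => simp [pvProd]
  | cons l xs ih =>
    simp only [List.cons_append, pvProd, ih, List.map_flatMap, List.flatMap_map,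
      List.map_map, Function.comp_def, List.cons_append, List.flatMap_assoc]

theorem pvProd_map_map {α β : Type} (f : α → β) (ls : List (List α)) :
    pvProd (ls.map (List.map f)) = (pvProd ls).map (List.map f) := by
  induction ls with
  | nil => rfl
  | cons l ls ih =>
    simp only [List.map_cons, pvProd, ih, List.map_flatMap, List.flatMap_map,
      List.map_map, Function.comp_def, List.map_cons]

-- 'if q(x): out.extend(f(x))' as filter-then-flatMap
theorem pvFlatMap_ite {α β : Type} (l : List α) (q : α → Bool) (f : α → List β) :
    l.flatMap (fun x => if q x then f x else []) = (l.filter q).flatMap f := by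
  induction l with
  | nil => rfl
  | cons x l ih =>
    rw [List.flatMap_cons, List.filter_cons]
    by_cases hx : q x = true
    · simp [hx, ih]
    · simp [Bool.eq_false_iff.mpr hx, ih]

-- filtering a product on the entry at a fixed position selects that cell's elements
theorem pvProd_filter_getD {α : Type} (d : α) (q : α → Bool) (cell : List α) :
    ∀ (pre post : List (List α)),
    (pvProd (pre ++ cell :: post)).filter (fun c => q (c.getD pre.length d)) =
      (pvProd pre).flatMap (fun a => (cell.filter q).flatMap (fun e =>
        (pvProd post).map (fun b => a ++ e :: b))) := by
  intro pre
  induction pre with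
  | nil =>
    intro post
    rw [List.nil_append, show pvProd (cell :: post) =
      cell.flatMap (fun x => (pvProd post).map (fun t => x :: t)) from rfl]
    rw [List.filter_flatMap]
    have hx : ∀ x : α,
        (((pvProd post).map (fun t => x :: t)).filter (fun c => q (c.getD ([] : List (List α)).length d))) =
        if q x then (pvProd post).map (fun t => x :: t) else [] := by
      intro x
      rw [List.filter_map]
      have : ∀ t ∈ pvProd post,
          ((fun c => q (c.getD ([] : List (List α)).length d)) ∘ (fun t => x :: t)) t = q x := by
        intro t _; simp
      rw [List.filter_congr this]
      by_cases hq : q x = true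
      · simp [hq]
      · simp [Bool.eq_false_iff.mpr hq]
    rw [List.flatMap_congr (fun x _ => hx x), pvFlatMap_ite]
    simp [pvProd]
  | cons l pre ih =>
    intro post
    rw [List.cons_append, show pvProd (l :: (pre ++ cell :: post)) =
      l.flatMap (fun x => (pvProd (pre ++ cell :: post)).map (fun t => x :: t)) from rfl]
    rw [List.filter_flatMap]
    have hx : ∀ x : α,
        (((pvProd (pre ++ cell :: post)).map (fun t => x :: t)).filter
          (fun c => q (c.getD (l :: pre).length d))) =
        ((pvProd (pre ++ cell :: post)).filter (fun c => q (c.getD pre.length d))).map (fun t => x :: t) := by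
      intro x
      rw [List.filter_map]
      have hpt : ∀ t ∈ pvProd (pre ++ cell :: post),
          ((fun c => q (c.getD (l :: pre).length d)) ∘ (fun t => x :: t)) t =
          (fun c => q (c.getD pre.length d)) t := by
        intro t _; simp
      rw [List.filter_congr hpt]
    rw [List.flatMap_congr (fun x _ => hx x)]
    rw [show pvProd (l :: pre) = l.flatMap (fun x => (pvProd pre).map (fun t => x :: t)) from rfl]
    simp only [ih post, List.map_flatMap, List.flatMap_map, List.flatMap_assoc,
      List.map_map, Function.comp_def, List.cons_append]

-- no element of enumerate vals s has index t < s
theorem pvEnumFilter_lt (vals : List String) (s t : Int) (h : t < s) :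
    (PySem.List.enumerate vals s).filter (fun iv => iv.1 == t) = [] := by
  induction vals generalizing s with
  | nil => simp [PySem.List.enumerate_nil]
  | cons v vals ih =>
    rw [PySem.List.enumerate_cons, List.filter_cons]
    rw [show (((s, v) : Int × String).1 == t) = false from by simp; omega]
    exact ih (s + 1) (by omega)

-- enumerate indices are distinct: filtering on index s + i keeps exactly the i-th pair
theorem pvEnumFilter (vals : List String) (s : Int) (i : Nat) (hi : i < vals.length) :
    (PySem.List.enumerate vals s).filter (fun iv => iv.1 == s + (i : Int)) =
      [(s + (i : Int), vals[i])] := by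
  induction vals generalizing s i with
  | nil => simp at hi
  | cons v vals ih =>
    rw [PySem.List.enumerate_cons, List.filter_cons]
    cases i with
    | zero =>
      rw [show (((s, v) : Int × String).1 == s + ((0 : Nat) : Int)) = true from by simp]
      rw [pvEnumFilter_lt vals (s + 1) (s + ((0 : Nat) : Int)) (by omega)]
      simp
    | succ i =>
      rw [show (((s, v) : Int × String).1 == s + ((i + 1 : Nat) : Int)) = false from by simp; omega]
      have h2 := ih (s + 1) i (by simp only [List.length_cons] at hi; omega)
      rw [show (s + 1) + (i : Int) = s + ((i + 1 : Nat) : Int) from by push_cast; ring] at h2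
      simpa using h2

theorem pvEnumFilter_zero (vals : List String) (i : Nat) (hi : i < vals.length) :
    (PySem.List.enumerate vals).filter (fun iv => iv.1 == (i : Int)) = [((i : Int), vals[i])] := by
  have := pvEnumFilter vals 0 i hi
  simpa using this

-- the cell list splits around the changing slot
theorem pvCells_decomp (parameters : List String) (k : Nat) (hk : k < parameters.length)
    (values : List String) (fa : PySem.Dict String (List String)) :
    pvCellsB (k : Int) values fa parameters =
      ((parameters.take k).map (fun p => ((fa.get? p).getD []).map pvTagN)) ++
      ((PySem.List.enumerate values).map (fun iv => (some iv.1, iv.2))) ::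
      ((parameters.drop (k + 1)).map (fun p => ((fa.get? p).getD []).map pvTagN)) := by
  unfold pvCellsB
  apply List.ext_getElem
  · simp [PySem.List.length_enumerate]; omega
  · intro j hj1 hj2
    have hj : j < parameters.length := by simpa [PySem.List.length_enumerate] using hj1
    rw [List.getElem_map, PySem.List.getElem_enumerate]
    simp only [zero_add]
    have hlen : ((parameters.take k).map (fun p => ((fa.get? p).getD []).map pvTagN)).length = k := by
      simp; omega
    rcases lt_trichotomy j k with hjk | hjk | hjk
    · rw [show (((j : Nat) : Int) == ((k : Nat) : Int)) = false from by simp; omega]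
      simp only [Bool.false_eq_true, if_false]
      rw [List.getElem_append_left (h' := by simp; omega) (by simp; omega)]
      rw [List.getElem_map, List.getElem_take]
      rfl
    · subst hjk
      rw [show (((j : Nat) : Int) == ((j : Nat) : Int)) = true from by simp]
      simp only [if_true]
      rw [List.getElem_append_right (le_of_eq hlen)]
      simp only [hlen, Nat.sub_self, List.getElem_cons_zero]
    · rw [show (((j : Nat) : Int) == ((k : Nat) : Int)) = false from by simp; omega]
      simp only [Bool.false_eq_true, if_false]
      rw [List.getElem_append_right (by rw [hlen]; omega)]
      rw [List.getElem_cons]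
      rw [dif_neg (by rw [hlen]; omega)]
      rw [List.getElem_map, List.getElem_drop]
      have h5 : k + 1 + (j - ((parameters.take k).map (fun p => ((fa.get? p).getD []).map pvTagN)).length - 1) = j := by
        rw [hlen]; omega
      simp only [h5]
      rfl

-- the i-th bucket of the tagged global product is the product of the other cells
-- with the i-th value (quoted) spliced in at the changing position
theorem pvBucket_gen (pre post : List (List String)) (vals : List String) (i : Nat)
    (hi : i < vals.length) :
    ((pvProd ((pre.map (fun l => l.map pvTagN)) ++
        ((PySem.List.enumerate vals).map (fun iv => (some iv.1, iv.2))) ::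
        (post.map (fun l => l.map pvTagN)))).filter
      (fun c => (PySem.List.pyGetD c ((pre.length : Nat) : Int) ((none : Option Int), "")).1 == some (i : Int))).map pvRowB
    = (pvProd (pre ++ post)).map (fun c => pvSplice pre.length (c.map pvQuoteA) (pvQuoteA vals[i])) := by
  have hpred : ∀ c : List (Option Int × String),
      ((PySem.List.pyGetD c ((pre.length : Nat) : Int) ((none : Option Int), "")).1 == some (i : Int)) =
      (fun e : Option Int × String => e.1 == some (i : Int)) (c.getD (pre.map (fun l => l.map pvTagN)).length ((none : Option Int), "")) := by
    intro c; simp [PySem.List.pyGetD_natCast]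
  rw [List.filter_congr (fun c _ => hpred c)]
  rw [pvProd_filter_getD ((none : Option Int), "") (fun e => e.1 == some (i : Int))
      ((PySem.List.enumerate vals).map (fun iv => (some iv.1, iv.2)))
      (pre.map (fun l => l.map pvTagN)) (post.map (fun l => l.map pvTagN))]
  have hcell : (((PySem.List.enumerate vals).map (fun iv => ((some iv.1 : Option Int), iv.2))).filter
      (fun e => e.1 == some (i : Int))) = [((some (i : Int) : Option Int), vals[i])] := by
    rw [List.filter_map]
    have : ∀ iv ∈ PySem.List.enumerate vals,
        ((fun e : Option Int × String => e.1 == some (i : Int)) ∘ (fun iv : Int × String => ((some iv.1 : Option Int), iv.2))) iv =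
        (iv.1 == (i : Int)) := by intro iv _; simp
    rw [List.filter_congr this, pvEnumFilter_zero vals i hi]
    rfl
  rw [hcell]
  rw [pvProd_map_map, pvProd_map_map, pvProd_append]
  simp only [List.flatMap_map, List.map_flatMap, List.map_map, Function.comp_def,
    List.flatMap_cons, List.flatMap_nil, List.append_nil]
  apply List.flatMap_congr
  intro a ha
  have hla : a.length = pre.length := pvProd_length ha
  apply List.map_congr_left
  intro b hb
  unfold pvRowB pvSplice
  simp only [List.map_append, List.map_cons, List.map_map, Function.comp_def]
  have h1 : (a.map (fun v => pvQuoteB (pvTagN v).2)) = a.map pvQuoteA := rfl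
  have h2 : (b.map (fun v => pvQuoteB (pvTagN v).2)) = b.map pvQuoteA := rfl
  rw [h1, h2]
  have htake : (a.map pvQuoteA ++ b.map pvQuoteA).take pre.length = a.map pvQuoteA := by
    rw [List.take_append_of_le_length (by simp [hla])]
    simp [List.take_of_length_le, hla]
  have hdrop : (a.map pvQuoteA ++ b.map pvQuoteA).drop pre.length = b.map pvQuoteA := by
    rw [List.drop_append_of_le_length (by simp [hla])]
    simp [List.drop_of_length_le, hla]
  rw [htake, hdrop]
  simp [pvQuoteA, pvQuoteB]

-- intercalate over a cons with a nonempty tail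
theorem pvInter_cons (sep a : List Char) (ys : List (List Char)) (hy : ys ≠ []) :
    List.intercalate sep (a :: ys) = a ++ sep ++ List.intercalate sep ys := by
  cases ys with
  | nil => exact absurd rfl hy
  | cons b t => simp [List.intercalate, List.intersperse]

-- flatten of pieces-with-trailing-separator vs intercalate
theorem pvFlatten_sep (sep : List Char) (ps : List (List Char)) (hp : ps ≠ []) :
    (ps.map (fun x => x ++ sep)).flatten = List.intercalate sep ps ++ sep := by
  induction ps with
  | nil => exact absurd rfl hp
  | cons p t ih =>
    cases t with
    | nil => simp [List.intercalate]
    | cons q t' =>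
      rw [pvInter_cons sep p (q :: t') (by simp)]
      simp only [List.map_cons, List.flatten_cons] at ih ⊢
      rw [ih (by simp)]
      simp [List.append_assoc]

-- merging two adjacent pieces does not change the joined string
theorem pvInter_merge (sep : List Char) (xs : List (List Char)) (a b : List Char) :
    List.intercalate sep (xs ++ [a, b]) = List.intercalate sep (xs ++ [a ++ sep ++ b]) := by
  induction xs with
  | nil => simp [List.intercalate, List.intersperse, List.append_assoc]
  | cons x t ih =>
    cases t with
    | nil => simp [List.intercalate, List.intersperse, List.append_assoc]
    | cons y t' =>
      simp only [List.cons_append, List.intercalate, List.intersperse] at ih ⊢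
      simp_all

theorem pvInter_go (sep : List Char) (fuel : Nat) (l cur : List Char) (acc : List (List Char)) :
    List.intercalate sep (PySem.Chars.splitOn.go sep fuel l cur acc) =
      List.intercalate sep (((cur.reverse ++ l) :: acc).reverse) := by
  induction fuel generalizing l cur acc with
  | zero => rfl
  | succ fuel ih =>
    cases l with
    | nil =>
      rw [show PySem.Chars.splitOn.go sep (fuel + 1) [] cur acc = (cur.reverse :: acc).reverse from rfl]
      simp
    | cons c rest =>
      show List.intercalate sep
        (if sep.isPrefixOf (c :: rest) then
            PySem.Chars.splitOn.go sep fuel (List.drop sep.length (c :: rest)) [] (cur.reverse :: acc)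
          else PySem.Chars.splitOn.go sep fuel rest (c :: cur) acc) = _
      by_cases hp : sep.isPrefixOf (c :: rest)
      · rw [if_pos hp, ih]
        have hl : sep ++ List.drop sep.length (c :: rest) = c :: rest := by
          obtain ⟨t, ht⟩ := (by simpa [List.isPrefixOf_iff_prefix] using hp : sep <+: (c :: rest))
          rw [← ht]; simp
        simp only [List.reverse_cons, List.reverse_nil, List.nil_append, List.append_assoc]
        rw [show [cur.reverse] ++ [List.drop sep.length (c :: rest)] =
              [cur.reverse, List.drop sep.length (c :: rest)] from rfl]
        rw [pvInter_merge]
        rw [List.append_assoc, hl]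
      · rw [if_neg hp, ih]
        simp

-- joining on sep is a left inverse of splitting on sep
theorem pvJoin_splitOn (s : List Char) (sep : List Char) :
    List.intercalate sep (PySem.Chars.splitOn s sep) = s := by
  rw [show PySem.Chars.splitOn s sep = PySem.Chars.splitOn.go sep (s.length + 1) s [] [] from rfl,
    pvInter_go]
  simp [List.intercalate]

-- ', '.join(x.split(', ')) == x
theorem pvJoin_split_str (s : String) :
    PySem.Str.join ", " ((PySem.Str.split? s ", ").getD []) = s := by
  rw [show PySem.Str.split? s ", " =
        some ((PySem.Chars.splitOn s.toList [',', ' ']).map String.ofList) from by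
      simp [PySem.Str.split?, PySem.Chars.split?]]
  apply String.toList_inj.mp
  simp only [Option.getD_some, PySem.Str.toList_join, PySem.Chars.join, List.map_map,
    Function.comp_def, String.toList_ofList, pvLit_comma]
  simpa using pvJoin_splitOn s.toList [',', ' ']

-- the value of the left/right argument string at loop position i
def pvPieceL (change_idx : Int) (q : String) (combo : List String) (i : Int) : String :=
  if i == change_idx then q
  else pvQuoteA (PySem.List.pyGetD combo (i - (if change_idx < i then 1 else 0)) "")

theorem pvStepA_eq (ci : Int) (lv rv : String) (combo : List String)
    (s : String × String × String) (ip : Int × String) :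
    pvStepA ci lv rv combo s ip =
      (s.1 ++ pvPieceL ci (pvQuoteA lv) combo ip.1 ++ ", ",
       s.2.1 ++ pvPieceL ci (pvQuoteA rv) combo ip.1 ++ ", ",
       s.2.2 ++ pvPieceL ci (pvQuoteA lv) combo ip.1 ++ ", ") := by
  unfold pvStepA pvPieceL
  by_cases h : (ip.1 == ci) = true <;> simp [h]

theorem pvFold3 (ci : Int) (lv rv : String) (combo : List String)
    (l : List (Int × String)) (a b c : String) :
    (l.foldl (pvStepA ci lv rv combo) (a, b, c)).1.toList =
        a.toList ++ (l.map (fun ip => (pvPieceL ci (pvQuoteA lv) combo ip.1).toList ++ [',', ' '])).flatten ∧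
    (l.foldl (pvStepA ci lv rv combo) (a, b, c)).2.1.toList =
        b.toList ++ (l.map (fun ip => (pvPieceL ci (pvQuoteA rv) combo ip.1).toList ++ [',', ' '])).flatten ∧
    (l.foldl (pvStepA ci lv rv combo) (a, b, c)).2.2.toList =
        c.toList ++ (l.map (fun ip => (pvPieceL ci (pvQuoteA lv) combo ip.1).toList ++ [',', ' '])).flatten := by
  induction l generalizing a b c with
  | nil => simp
  | cons ip l ih =>
    rw [List.foldl_cons, pvStepA_eq]
    obtain ⟨i1, i2, i3⟩ := ih (a ++ pvPieceL ci (pvQuoteA lv) combo ip.1 ++ ", ")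
      (b ++ pvPieceL ci (pvQuoteA rv) combo ip.1 ++ ", ")
      (c ++ pvPieceL ci (pvQuoteA lv) combo ip.1 ++ ", ")
    refine ⟨?_, ?_, ?_⟩
    · rw [i1]; simp [String.toList_append, pvLit_comma, List.append_assoc]
    · rw [i2]; simp [String.toList_append, pvLit_comma, List.append_assoc]
    · rw [i3]; simp [String.toList_append, pvLit_comma, List.append_assoc]

-- the spliced row equals the per-index pieces of A's loop
theorem pvPieces_eq_args (parameters : List String) (k : Nat) (hk : k < parameters.length)
    (q : String) (combo : List String) (hc : combo.length + 1 = parameters.length) :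
    (PySem.List.enumerate parameters).map (fun ip => pvPieceL (k : Int) q combo ip.1) =
      pvSplice k (combo.map pvQuoteA) q := by
  have hrow : (combo.map pvQuoteA).length = combo.length := by simp
  unfold pvSplice
  apply List.ext_getElem
  · simp [PySem.List.length_enumerate] ; omega
  · intro j hj1 hj2
    have hj : j < parameters.length := by
      simpa [PySem.List.length_enumerate] using hj1
    rw [List.getElem_map, PySem.List.getElem_enumerate]
    simp only [zero_add]
    unfold pvPieceL
    rcases lt_trichotomy j k with hjk | hjk | hjk
    · rw [show (((j : Nat) : Int) == ((k : Nat) : Int)) = false from by simp; omega]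
      simp only [Bool.false_eq_true, if_false]
      rw [if_neg (by exact_mod_cast Nat.not_lt.mpr (le_of_lt hjk))]
      rw [sub_zero, PySem.List.pyGetD_eq_getElem combo "" (by positivity)
        (by exact_mod_cast (by omega : j < combo.length))]
      rw [List.getElem_append_left (h' := by simp [hrow]; omega)
          (by simp [hrow]; omega)]
      rw [List.getElem_append_left (h' := by simp [hrow]; omega)
          (by simp [hrow]; omega)]
      rw [List.getElem_take, List.getElem_map]
      simp
    · subst hjk
      rw [show (((j : Nat) : Int) == ((j : Nat) : Int)) = true from by simp]
      simp only [if_true]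
      rw [List.getElem_append_left (h' := by simp [hrow]; omega)
          (by simp [hrow]; omega)]
      rw [List.getElem_append_right (by simp [hrow])]
      simp [hrow]
    · rw [show (((j : Nat) : Int) == ((k : Nat) : Int)) = false from by simp; omega]
      simp only [Bool.false_eq_true, if_false]
      rw [if_pos (by exact_mod_cast hjk : ((k : Int) < (j : Int)))]
      rw [show ((j : Int) - 1) = ((j - 1 : Nat) : Int) from by omega,
        PySem.List.pyGetD_eq_getElem combo "" (by positivity)
          (by exact_mod_cast (by omega : j - 1 < combo.length))]
      rw [List.getElem_append_right (by simp [hrow]; omega)]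
      have hlen : ((combo.map pvQuoteA).take k ++ [q]).length = k + 1 := by
        simp only [List.length_append, List.length_take, List.length_map, List.length_cons,
          List.length_nil]
        omega
      simp only [hlen]
      rw [List.getElem_drop, List.getElem_map]
      congr 1
      simp only [show k + (j - (k + 1)) = j - 1 from by omega]
      simp

theorem pvChop_toList (st : String) (X : List Char) (hst : st.toList = X ++ [',', ' ']) :
    (PySem.Str.slice st none (some (-2))).toList = X := by
  have h2 := PySem.List.slice_to_neg_ofNat st.toList 2 (by norm_num)
  simp only [PySem.Str.toList_slice, PySem.Chars.slice_eq_listSlice] at *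
  rw [h2, hst]
  simp

-- A's per-combination item equals B's item on the two spliced rows
theorem pvItem_eq (function_name : String) (parameters : List String) (k : Nat)
    (hk : k < parameters.length) (lv rv : String) (combo : List String)
    (hc : combo.length + 1 = parameters.length) :
    pvItemA function_name parameters (k : Int) lv rv combo =
      pvItemB function_name (pvSplice k (combo.map pvQuoteA) (pvQuoteA lv))
        (pvSplice k (combo.map pvQuoteA) (pvQuoteA rv)) := by
  obtain ⟨h1, h2, h3⟩ := pvFold3 (k : Int) lv rv combo (PySem.List.enumerate parameters)
    (function_name ++ "(") (function_name ++ "(") ("assert " ++ function_name ++ "(")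
  have hargs : ∀ q : String,
      ((PySem.List.enumerate parameters).map
        (fun ip => (pvPieceL (k : Int) q combo ip.1).toList ++ [',', ' '])).flatten =
      List.intercalate [',', ' '] ((pvSplice k (combo.map pvQuoteA) q).map String.toList)
        ++ [',', ' '] := by
    intro q
    have hm := pvPieces_eq_args parameters k hk q combo hc
    calc ((PySem.List.enumerate parameters).map
            (fun ip => (pvPieceL (k : Int) q combo ip.1).toList ++ [',', ' '])).flatten
        = ((((PySem.List.enumerate parameters).map
            (fun ip => pvPieceL (k : Int) q combo ip.1)).map String.toList).map
              (fun x => x ++ [',', ' '])).flatten := by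
          rw [List.map_map, List.map_map]; rfl
      _ = (((pvSplice k (combo.map pvQuoteA) q).map String.toList).map
            (fun x => x ++ [',', ' '])).flatten := by rw [hm]
      _ = _ := pvFlatten_sep _ _ (by simp [pvSplice])
  have hjoin : ∀ q : String,
      (PySem.Str.join ", " (pvSplice k (combo.map pvQuoteA) q)).toList =
        List.intercalate [',', ' '] ((pvSplice k (combo.map pvQuoteA) q).map String.toList) := by
    intro q
    rw [PySem.Str.toList_join]
    simp [PySem.Chars.join, pvLit_comma]
  simp only [pvItemA, pvItemB]
  have hL : PySem.Str.slice ((PySem.List.enumerate parameters).foldl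
        (pvStepA (k : Int) lv rv combo)
        (function_name ++ "(", function_name ++ "(", "assert " ++ function_name ++ "(")).1
        none (some (-2)) ++ ")" =
      function_name ++ "(" ++ PySem.Str.join ", " (pvSplice k (combo.map pvQuoteA) (pvQuoteA lv)) ++ ")" := by
    apply String.toList_inj.mp
    rw [String.toList_append,
      pvChop_toList _ ((function_name ++ "(").toList ++
          List.intercalate [',', ' '] ((pvSplice k (combo.map pvQuoteA) (pvQuoteA lv)).map String.toList))
        (by rw [h1, hargs (pvQuoteA lv)]; simp [List.append_assoc])]
    simp [String.toList_append, pvLit_lpar, pvLit_rpar, hjoin, List.append_assoc]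
  have hR : PySem.Str.slice ((PySem.List.enumerate parameters).foldl
        (pvStepA (k : Int) lv rv combo)
        (function_name ++ "(", function_name ++ "(", "assert " ++ function_name ++ "(")).2.1
        none (some (-2)) ++ ")" =
      function_name ++ "(" ++ PySem.Str.join ", " (pvSplice k (combo.map pvQuoteA) (pvQuoteA rv)) ++ ")" := by
    apply String.toList_inj.mp
    rw [String.toList_append,
      pvChop_toList _ ((function_name ++ "(").toList ++
          List.intercalate [',', ' '] ((pvSplice k (combo.map pvQuoteA) (pvQuoteA rv)).map String.toList))
        (by rw [h2, hargs (pvQuoteA rv)]; simp [List.append_assoc])]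
    simp [String.toList_append, pvLit_lpar, pvLit_rpar, hjoin, List.append_assoc]
  have hT : PySem.Str.slice ((PySem.List.enumerate parameters).foldl
        (pvStepA (k : Int) lv rv combo)
        (function_name ++ "(", function_name ++ "(", "assert " ++ function_name ++ "(")).2.2
        none (some (-2)) ++ ") == " ++ function_name ++ "(" =
      "assert " ++ function_name ++ "(" ++ PySem.Str.join ", " (pvSplice k (combo.map pvQuoteA) (pvQuoteA lv)) ++ ") == " ++ function_name ++ "(" := by
    apply String.toList_inj.mp
    simp only [String.toList_append]
    rw [pvChop_toList _ (("assert " ++ function_name ++ "(").toList ++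
          List.intercalate [',', ' '] ((pvSplice k (combo.map pvQuoteA) (pvQuoteA lv)).map String.toList))
        (by rw [h3, hargs (pvQuoteA lv)]; simp [List.append_assoc])]
    simp [String.toList_append, pvLit_lpar, pvLit_assert, pvLit_eqmid, hjoin, List.append_assoc]
  rw [hL, hR, hT, pvJoin_split_str]

-- pvBucket_gen with the position given as an explicit index
theorem pvBucket (pre post : List (List String)) (k : Nat) (hpre : pre.length = k)
    (vals : List String) (i : Nat) (hi : i < vals.length) :
    ((pvProd ((pre.map (fun l => l.map pvTagN)) ++
        ((PySem.List.enumerate vals).map (fun iv => (some iv.1, iv.2))) ::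
        (post.map (fun l => l.map pvTagN)))).filter
      (fun c => (PySem.List.pyGetD c (k : Int) ((none : Option Int), "")).1 == some (i : Int))).map pvRowB
    = (pvProd (pre ++ post)).map (fun c => pvSplice k (c.map pvQuoteA) (pvQuoteA vals[i])) := by
  subst hpre
  exact pvBucket_gen pre post vals i hi

-- pvBucket with both sides phrased over parameter lists and a value function
theorem pvBucket' (ps qs : List String) (V : String → List String) (k : Nat)
    (hpre : ps.length = k) (vals : List String) (i : Nat) (hi : i < vals.length) :
    ((pvProd ((ps.map (fun p => (V p).map pvTagN)) ++
        ((PySem.List.enumerate vals).map (fun iv => (some iv.1, iv.2))) ::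
        (qs.map (fun p => (V p).map pvTagN)))).filter
      (fun c => (PySem.List.pyGetD c (k : Int) ((none : Option Int), "")).1 == some (i : Int))).map pvRowB
    = (pvProd ((ps ++ qs).map V)).map (fun c => pvSplice k (c.map pvQuoteA) (pvQuoteA vals[i])) := by
  have h1 : ps.map (fun p => (V p).map pvTagN) = (ps.map V).map (List.map pvTagN) := by
    rw [List.map_map]; rfl
  have h2 : qs.map (fun p => (V p).map pvTagN) = (qs.map V).map (List.map pvTagN) := by
    rw [List.map_map]; rfl
  rw [h1, h2, List.map_append]
  exact pvBucket (ps.map V) (qs.map V) k (by simpa using hpre) vals i hi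

-- a list with two distinct members has more than one distinct element
theorem pvTwo_mem_set {xs : List String} {a b : String} (ha : a ∈ xs) (hb : b ∈ xs)
    (hab : a ≠ b) : 1 < (PySem.Set.ofList xs).length := by
  have ha' := (PySem.Set.mem_ofList xs a).mpr ha
  have hb' := (PySem.Set.mem_ofList xs b).mpr hb
  cases hset : PySem.Set.ofList xs with
  | nil => rw [hset] at ha'; simp at ha'
  | cons x t =>
    cases t with
    | nil =>
      rw [hset] at ha' hb'
      simp at ha' hb'
      exact absurd (ha'.trans hb'.symm) hab
    | cons y t' => simp

-- ===== VERDICT (by name: the statement is the Claim_ definition above) =====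
theorem generate_test_template_spec : Claim_equal_generate_test_template := by
  intro function_name parameters function_attributes _
  unfold Spec_generate_test_template generate_test_template generate_test_template_alt
  rw [show pvFillB = pvFillA from rfl]
  rw [PySem.List.foldl_append_singleton_eq_map, PySem.List.foldl_append_singleton_eq_map,
    PySem.List.enumerate_eq_map_pyRange (d := ""), List.map_map]
  simp only [List.nil_append, PySem.List.len_eq]
  apply List.map_congr_left
  intro j hj
  rw [PySem.List.mem_pyRange_one] at hj
  obtain ⟨hj0, hjm⟩ := hj
  obtain ⟨k, rfl⟩ : ∃ k : Nat, j = (k : Int) := ⟨j.toNat, (Int.toNat_of_nonneg hj0).symm⟩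
  have hk : k < parameters.length := by exact_mod_cast hjm
  simp only [Function.comp_apply]
  by_cases hg : 1 < (PySem.Set.ofList (((pvFillA parameters (PySem.Dict.mk function_attributes)).get?
      (PySem.List.pyGetD parameters (k : Int) "")).getD [])).length
  case neg =>
    rw [if_neg hg]
    have hall : ∀ a ∈ (((pvFillA parameters (PySem.Dict.mk function_attributes)).get?
        (PySem.List.pyGetD parameters (k : Int) "")).getD []),
        ∀ b ∈ (((pvFillA parameters (PySem.Dict.mk function_attributes)).get?
        (PySem.List.pyGetD parameters (k : Int) "")).getD []), a = b := by
      intro a ha b hb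
      by_contra hne
      exact hg (pvTwo_mem_set ha hb hne)
    refine Eq.trans ?_ (List.foldl_fixed (a := ([] : List (List String)))
      (PySem.List.pyRange 0 (((((pvFillA parameters (PySem.Dict.mk function_attributes)).get?
        (PySem.List.pyGetD parameters (k : Int) "")).getD []).length : Int)) 1))
    apply PySem.List.foldl_congr_mem
    intro acc li hli
    rw [PySem.List.mem_pyRange_one] at hli
    refine Eq.trans ?_ (List.foldl_fixed (a := acc)
      (PySem.List.pyRange li (((((pvFillA parameters (PySem.Dict.mk function_attributes)).get?
        (PySem.List.pyGetD parameters (k : Int) "")).getD []).length : Int)) 1))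
    apply PySem.List.foldl_congr_mem
    intro acc2 ri hri
    rw [PySem.List.mem_pyRange_one] at hri
    have heq := hall _ (PySem.List.pyGetD_mem
        (xs := (((pvFillA parameters (PySem.Dict.mk function_attributes)).get?
          (PySem.List.pyGetD parameters (k : Int) "")).getD [])) (i := li) ""
        ⟨by omega, by omega⟩)
      _ (PySem.List.pyGetD_mem
        (xs := (((pvFillA parameters (PySem.Dict.mk function_attributes)).get?
          (PySem.List.pyGetD parameters (k : Int) "")).getD [])) (i := ri) ""
        ⟨by omega, by omega⟩)
    rw [show (PySem.List.pyGetD (((pvFillA parameters (PySem.Dict.mk function_attributes)).get?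
        (PySem.List.pyGetD parameters (k : Int) "")).getD []) li "" !=
      PySem.List.pyGetD (((pvFillA parameters (PySem.Dict.mk function_attributes)).get?
        (PySem.List.pyGetD parameters (k : Int) "")).getD []) ri "") = false from by
        simp only [bne_eq_false_iff_eq]; exact heq]
    simp
  rw [if_pos hg]
  apply PySem.List.foldl_congr_mem
  intro acc li hli
  rw [PySem.List.mem_pyRange_one] at hli
  obtain ⟨hli0, hlin⟩ := hli
  obtain ⟨li', rfl⟩ : ∃ l : Nat, li = (l : Int) := ⟨li.toNat, (Int.toNat_of_nonneg hli0).symm⟩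
  rw [PySem.List.pyRange_one_cons (by exact_mod_cast hlin)]
  rw [List.foldl_cons]
  simp only [bne_self_eq_false, Bool.false_eq_true, if_false]
  apply PySem.List.foldl_congr_mem
  intro acc2 ri hri
  rw [PySem.List.mem_pyRange_one] at hri
  obtain ⟨hri0, hrin⟩ := hri
  obtain ⟨ri', rfl⟩ : ∃ r : Nat, ri = (r : Int) := ⟨ri.toNat, (Int.toNat_of_nonneg (by omega)).symm⟩
  set vals : List String := ((pvFillA parameters (PySem.Dict.mk function_attributes)).get?
    (PySem.List.pyGetD parameters (k : Int) "")).getD [] with hvals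
  have hli2 : li' < vals.length := by exact_mod_cast hlin
  have hri2 : ri' < vals.length := by exact_mod_cast hrin
  by_cases hv : (PySem.List.pyGetD vals (li' : Int) "" != PySem.List.pyGetD vals (ri' : Int) "") = true
  · simp only [hv, if_true]
    rw [show ((k : Int) + 1) = ((k + 1 : Nat) : Int) from by push_cast; ring]
    rw [PySem.List.slice_to_natCast, PySem.List.slice_from_natCast]
    rw [PySem.List.pyGetD_map_pyRange_of_nonneg _ _ _ _ (by positivity) (by exact_mod_cast hli2)]
    rw [PySem.List.pyGetD_map_pyRange_of_nonneg _ _ _ _ (by positivity) (by exact_mod_cast hri2)]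
    rw [pvCells_decomp parameters k hk vals (pvFillA parameters (PySem.Dict.mk function_attributes))]
    rw [pvBucket' (parameters.take k) (parameters.drop (k + 1))
      (fun p => ((pvFillA parameters (PySem.Dict.mk function_attributes)).get? p).getD [])
      k (by simp; omega) vals li' hli2]
    rw [pvBucket' (parameters.take k) (parameters.drop (k + 1))
      (fun p => ((pvFillA parameters (PySem.Dict.mk function_attributes)).get? p).getD [])
      k (by simp; omega) vals ri' hri2]
    rw [List.zip_map']
    rw [PySem.List.foldl_append_singleton_eq_map, PySem.List.foldl_append_singleton_eq_map,
      List.map_map]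
    congr 1
    apply List.map_congr_left
    intro c hcmem
    have hclen : c.length + 1 = parameters.length := by
      have h6 := pvProd_length hcmem
      simp only [List.length_map, List.length_append, List.length_take, List.length_drop] at h6
      omega
    rw [PySem.List.pyGetD_eq_getElem vals "" (by positivity) (by exact_mod_cast hli2),
      PySem.List.pyGetD_eq_getElem vals "" (by positivity) (by exact_mod_cast hri2)]
    simp only [Int.toNat_natCast, Function.comp_apply]
    exact pvItem_eq function_name parameters k hk _ _ c hclen
  · simp only [Bool.not_eq_true] at hv
    simp only [hv, Bool.false_eq_true, if_false]
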